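-- pv_equiv track=rewrite | github.com/Nattpalacios/ACSO | Laboratorios/Laboratorio2/lab2a.py | mapearNumeroInicial
-- ===== SOURCE A (Python) =====
-- listadoLet = ["A","B","C","D","E","F","G","H","I","J","K","L","M","N","O","P","Q","R","S","T","U","V","W","X","Y","Z"]
--
-- listadoNum = [10,11,12,13,14,15,16,17,18,19,20,21,22,23,24,25,26,27,28,29,30,31,32,33,34,35,36]
--
-- def mapearNumeroInicial(numero,baseOrigen):
--     numeroReal = []
--     for x in range(len(numero)):
--         pos = -1
--         for y in range(0,baseOrigen-9):
--             if(numero[x] == listadoLet[y]):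
--                 pos = y
--         if(pos != -1):
--             numeroReal.append(listadoNum[pos])
--         else:
--             numeroReal.append(int(numero[x]))
--     return numeroReal
-- ===== SOURCE B (Python) =====
-- def mapearNumeroInicial(numero, baseOrigen):
--     numeroReal = []
--     for c in numero:
--         p = ord(c) - 65
--         if 0 <= p <= 25 and p < baseOrigen - 9:
--             numeroReal.append(p + 10)
--         else:
--             numeroReal.append(int(c))
--     return numeroReal
-- ===== Notes on version B (the rewrite author's own statement) =====
-- stated objective: simpler
-- what changed: The inner scan over the 26-letter table (and the table lookups) is replaced by a closed-form computation ord(c)-65 per character, keeping the exact < baseOrigen-9 bound.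
import Mathlib
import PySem

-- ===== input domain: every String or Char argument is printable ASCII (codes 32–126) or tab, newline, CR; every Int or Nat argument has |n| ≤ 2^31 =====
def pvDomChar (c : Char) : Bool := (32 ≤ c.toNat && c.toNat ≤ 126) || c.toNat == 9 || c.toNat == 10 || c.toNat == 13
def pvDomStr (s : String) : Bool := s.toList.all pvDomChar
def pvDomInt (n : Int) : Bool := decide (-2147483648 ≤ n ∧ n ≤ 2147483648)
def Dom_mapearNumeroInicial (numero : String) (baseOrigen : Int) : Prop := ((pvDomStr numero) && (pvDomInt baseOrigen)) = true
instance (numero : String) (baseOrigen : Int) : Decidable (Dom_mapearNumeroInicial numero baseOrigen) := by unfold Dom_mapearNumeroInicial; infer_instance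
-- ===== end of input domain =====

-- B replaces A's inner scan over the 26-letter table by the closed form ord(c)-65 (same bound
-- check p < baseOrigen-9), objective: simpler. Where Python raises (IndexError for baseOrigen ≥ 36
-- on non-empty input, ValueError from int(c)) the ports use defaults; those inputs are outside Pre_.

-- ===== PORT A =====
-- the module-level tables; the 1-char strings of listadoLet are ported at Char level (numero[x]
-- is a Char here, and comparing the chars is exactly comparing the 1-char strings)
def listadoLet : List Char :=
  ['A','B','C','D','E','F','G','H','I','J','K','L','M','N','O','P','Q','R','S','T','U','V','W','X','Y','Z']
def listadoNum : List Int :=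
  [10,11,12,13,14,15,16,17,18,19,20,21,22,23,24,25,26,27,28,29,30,31,32,33,34,35,36]

-- A's inner letter-search loop (the body of 'for y in range(0, baseOrigen-9)')
def innerPos (c : Char) (k : Int) : Int :=
  (PySem.List.pyRange 0 k 1).foldl
    (fun pos y => if c = PySem.List.pyGetD listadoLet y ' ' then y else pos) (-1)
    -- listadoLet[y]: default unreachable inside Pre_ (y < 26 there; y >= 26 is the IndexError)

def mapearNumeroInicial (numero : String) (baseOrigen : Int) : List Int :=
  (PySem.List.pyRange 0 (PySem.Str.len numero) 1).foldl
    (fun numeroReal x =>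
      let c := PySem.List.pyGetD numero.toList x ' '   -- numero[x]; x always in range
      let pos := innerPos c (baseOrigen - 9)
      if pos ≠ -1 then numeroReal ++ [PySem.List.pyGetD listadoNum pos 0]
      else numeroReal ++ [(PySem.Int.ofChars? [c]).getD 0])  -- int(numero[x]); none = ValueError, outside Pre_
    []

-- ===== PORT B =====
def mapearNumeroInicial_alt (numero : String) (baseOrigen : Int) : List Int :=
  numero.toList.foldl
    (fun numeroReal c =>
      let p : Int := (c.toNat : Int) - 65              -- ord(c) - 65
      if 0 ≤ p ∧ p ≤ 25 ∧ p < baseOrigen - 9 then numeroReal ++ [p + 10]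
      else numeroReal ++ [(PySem.Int.ofChars? [c]).getD 0])  -- int(c); none = ValueError, outside Pre_
    []

-- ===== PRECONDITION & SPEC =====
-- Pre_ is exactly where Python A returns: an empty string, or baseOrigen ≤ 35 (else the inner
-- loop indexes listadoLet past 25: IndexError) with every character either an uppercase letter
-- inside the base's letter window or a decimal digit (else int(c): ValueError).
def Pre_mapearNumeroInicial (numero : String) (baseOrigen : Int) : Prop :=
  (numero.toList.isEmpty ||
   (decide (baseOrigen ≤ 35) &&
    numero.toList.all fun c =>
      (decide (65 ≤ c.toNat) && decide (c.toNat ≤ 90) &&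
       decide ((c.toNat : Int) - 65 < baseOrigen - 9)) ||
      (decide (48 ≤ c.toNat) && decide (c.toNat ≤ 57)))) = true
instance (numero : String) (baseOrigen : Int) : Decidable (Pre_mapearNumeroInicial numero baseOrigen) := by
  unfold Pre_mapearNumeroInicial; infer_instance

def pvWitness_mapearNumeroInicial : String × Int := ("A9", 16)

def Spec_mapearNumeroInicial (numero : String) (baseOrigen : Int) (out : List Int) : Prop := out = mapearNumeroInicial_alt numero baseOrigen
instance (numero : String) (baseOrigen : Int) (out : List Int) : Decidable (Spec_mapearNumeroInicial numero baseOrigen out) := by unfold Spec_mapearNumeroInicial; infer_instance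

-- ===== CLAIM (what is proved, stated in full; the proofs are below) =====
def Claim_equal_mapearNumeroInicial : Prop := ∀ (numero : String) (baseOrigen : Int), Dom_mapearNumeroInicial numero baseOrigen → Pre_mapearNumeroInicial numero baseOrigen → Spec_mapearNumeroInicial numero baseOrigen (mapearNumeroInicial numero baseOrigen)

-- ===== LEMMAS AND PROOFS =====

-- the table lookups, in closed form
theorem listadoLet_getD (n : Nat) (hn : n < 26) (c : Char) :
    (c = listadoLet.getD n ' ') ↔ (c.toNat = 65 + n) := by
  interval_cases n <;>
    (constructor
     · intro h; subst h; decide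
     · intro h
       have h2 := Char.ofNat_toNat c
       rw [h] at h2; rw [← h2]; decide)

theorem listadoNum_getD (n : Nat) (hn : n < 26) :
    listadoNum.getD n 0 = (n : Int) + 10 := by
  interval_cases n <;> rfl

-- A's inner search loop, in closed form, Nat bound (k ≤ 26: the listadoLet lookup never defaults)
theorem innerPos_eq_nat (c : Char) : ∀ (n : Nat), n ≤ 26 →
    innerPos c (n : Int)
    = (if 65 ≤ (c.toNat : Int) ∧ (c.toNat : Int) ≤ 90 ∧ (c.toNat : Int) - 65 < (n : Int)
       then (c.toNat : Int) - 65 else -1)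
  | 0, _ => by
      rw [innerPos, PySem.List.pyRange_one_eq_nil (by omega)]
      rw [if_neg (by omega)]; rfl
  | n + 1, h => by
      have hrec := innerPos_eq_nat c n (by omega)
      rw [innerPos] at hrec ⊢
      rw [show ((n + 1 : Nat) : Int) = (n : Int) + 1 by push_cast; ring]
      rw [PySem.List.pyRange_one_succ_right (by positivity), List.foldl_append, hrec]
      simp only [List.foldl, PySem.List.pyGetD_natCast]
      by_cases hc : c = listadoLet.getD n ' '
      · have hcn : c.toNat = 65 + n := (listadoLet_getD n (by omega) c).mp hc
        rw [if_pos hc, if_pos (by omega)]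
        omega
      · have hcn : c.toNat ≠ 65 + n := fun h' => hc ((listadoLet_getD n (by omega) c).mpr h')
        rw [if_neg hc]
        split_ifs with h1 h2 h2 <;> first | rfl | omega

theorem innerPos_eq (c : Char) (k : Int) (hk : k ≤ 26) :
    innerPos c k
    = (if 65 ≤ (c.toNat : Int) ∧ (c.toNat : Int) ≤ 90 ∧ (c.toNat : Int) - 65 < k
       then (c.toNat : Int) - 65 else -1) := by
  by_cases h : k ≤ 0
  · rw [innerPos, PySem.List.pyRange_one_eq_nil h, if_neg (by omega)]; rfl
  · have hk0 : k = ((k.toNat : Nat) : Int) := by omega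
    rw [hk0, innerPos_eq_nat c k.toNat (by omega)]

-- per-character agreement of the two step functions, under Pre_'s character condition
theorem step_eq (baseOrigen : Int) (hb : baseOrigen ≤ 35) (acc : List Int) (c : Char)
    (hc : ((65 ≤ c.toNat ∧ c.toNat ≤ 90) ∧ (c.toNat : Int) - 65 < baseOrigen - 9) ∨
          (48 ≤ c.toNat ∧ c.toNat ≤ 57)) :
    (let pos := innerPos c (baseOrigen - 9)
     if pos ≠ -1 then acc ++ [PySem.List.pyGetD listadoNum pos 0]
     else acc ++ [(PySem.Int.ofChars? [c]).getD 0])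
    = (let p : Int := (c.toNat : Int) - 65
       if 0 ≤ p ∧ p ≤ 25 ∧ p < baseOrigen - 9 then acc ++ [p + 10]
       else acc ++ [(PySem.Int.ofChars? [c]).getD 0]) := by
  show (if innerPos c (baseOrigen - 9) ≠ -1
        then acc ++ [PySem.List.pyGetD listadoNum (innerPos c (baseOrigen - 9)) 0]
        else acc ++ [(PySem.Int.ofChars? [c]).getD 0]) = _
  rw [innerPos_eq c (baseOrigen - 9) (by omega)]
  by_cases hlet : 65 ≤ (c.toNat : Int) ∧ (c.toNat : Int) ≤ 90 ∧ (c.toNat : Int) - 65 < baseOrigen - 9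
  · rw [if_pos hlet, if_pos (by omega), if_pos (by omega)]
    have hm : (c.toNat : Int) - 65 = ((c.toNat - 65 : Nat) : Int) := by omega
    rw [hm, PySem.List.pyGetD_natCast, listadoNum_getD (c.toNat - 65) (by omega)]
  · have hdig : 48 ≤ c.toNat ∧ c.toNat ≤ 57 := by
      rcases hc with ⟨⟨h1, h2⟩, h3⟩ | h
      · exact absurd ⟨by omega, by omega, h3⟩ hlet
      · exact h
    rw [if_neg hlet, if_neg (by omega), if_neg (by omega)]

-- ===== VERDICT (by name: the statement is the Claim_ definition above) =====
theorem mapearNumeroInicial_spec : Claim_equal_mapearNumeroInicial := by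
  intro numero baseOrigen _hdom hpre
  unfold Spec_mapearNumeroInicial
  have hA : mapearNumeroInicial numero baseOrigen
      = numero.toList.foldl (fun numeroReal c =>
          let pos := innerPos c (baseOrigen - 9)
          if pos ≠ -1 then numeroReal ++ [PySem.List.pyGetD listadoNum pos 0]
          else numeroReal ++ [(PySem.Int.ofChars? [c]).getD 0]) [] := by
    unfold mapearNumeroInicial
    rw [PySem.Str.len_eq]
    exact PySem.List.foldl_pyRange_zero_pyGetD' numero.toList ' '
      (fun numeroReal c =>
        let pos := innerPos c (baseOrigen - 9)
        if pos ≠ -1 then numeroReal ++ [PySem.List.pyGetD listadoNum pos 0]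
        else numeroReal ++ [(PySem.Int.ofChars? [c]).getD 0]) []
  rw [hA]
  unfold mapearNumeroInicial_alt
  unfold Pre_mapearNumeroInicial at hpre
  simp only [Bool.or_eq_true, Bool.and_eq_true, List.all_eq_true, decide_eq_true_eq,
    List.isEmpty_iff] at hpre
  rcases hpre with h | ⟨hb, hall⟩
  · rw [h]; rfl
  · exact PySem.List.foldl_congr_mem _ _ _ [] (fun acc x hx => step_eq baseOrigen hb acc x (hall x hx))
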